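-- pv_equiv track=rewrite | github.com/Josep-Roura/telecomunications-projects | analizer-DDoS/dashboard/app.py | _row_style
-- ===== SOURCE A (Python) =====
-- def _row_style(row):
--     sty = [""]*len(row)
--     # colorear por severidad si existe
--     if "severity" in row:
--         sev = str(row.get("severity") or "")
--         color = ""
--         if sev == "CRITICA": color = "#ffcccc"
--         elif sev == "ALTA":  color = "#ffe6cc"
--         elif sev == "MEDIA": color = "#fff6cc"
--         elif sev == "BAJA":  color = "#f2ffcc"
--         if color:
--             sty = [f"background-color: {color}"]*len(row)
--     # resaltar ML flag
--     if "ml_flag" in row and int(row["ml_flag"]) == 1: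
--         sty = [s + "; font-weight: 600" if s else "font-weight: 600" for s in sty]
--     # bloqueados
--     if "blocked" in row and int(row["blocked"]) == 1:
--         sty = [s + "; border-left: 4px solid #b00" if s else "border-left: 4px solid #b00" for s in sty]
--     return sty
-- ===== SOURCE B (Python) =====
-- def _row_style(row):
--     colors = {"CRITICA": "#ffcccc", "ALTA": "#ffe6cc", "MEDIA": "#fff6cc", "BAJA": "#f2ffcc"}
--     frags = []
--     color = colors.get(row.get("severity") or "", "")
--     if color:
--         frags.append("background-color: " + color)
--     if "ml_flag" in row and int(row["ml_flag"]) == 1: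
--         frags.append("font-weight: 600")
--     if "blocked" in row and int(row["blocked"]) == 1:
--         frags.append("border-left: 4px solid #b00")
--     return ["; ".join(frags)] * len(row)
-- ===== Notes on version B (the rewrite author's own statement) =====
-- stated objective: simpler
-- what changed: Instead of three per-cell list comprehensions that conditionally rewrite a len(row)-sized style list, B collects the style fragments once (color via a dict lookup, ml/blocked flags as appends), joins them with '; ' and replicates the single resulting style string len(row) times.
import Mathlib
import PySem

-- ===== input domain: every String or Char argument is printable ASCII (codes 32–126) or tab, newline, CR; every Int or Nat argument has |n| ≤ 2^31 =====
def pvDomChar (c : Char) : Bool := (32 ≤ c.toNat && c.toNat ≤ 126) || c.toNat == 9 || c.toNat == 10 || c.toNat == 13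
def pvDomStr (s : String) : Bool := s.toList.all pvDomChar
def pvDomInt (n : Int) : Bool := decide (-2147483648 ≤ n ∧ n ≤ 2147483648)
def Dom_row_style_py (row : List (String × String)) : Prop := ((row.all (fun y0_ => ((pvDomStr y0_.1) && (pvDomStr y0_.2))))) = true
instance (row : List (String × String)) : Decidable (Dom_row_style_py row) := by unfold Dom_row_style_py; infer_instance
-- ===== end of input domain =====

-- B replaces A's three conditional per-cell list rewrites by collecting the style fragments once,
-- joining them with "; " and replicating the single style string len(row) times (objective: simpler).


-- ===== PORT A =====
def row_style_py (row : List (String × String)) : List String :=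
  let d := PySem.Dict.mk row
  let sty : List String := List.replicate row.length ""
  -- if "severity" in row: …
  let sty :=
    if d.contains "severity" then
      -- str(row.get("severity") or "") : the value, or "" when absent/empty (falsy)
      let sev := (d.get? "severity").getD ""
      let color :=
        if sev = "CRITICA" then "#ffcccc"
        else if sev = "ALTA" then "#ffe6cc"
        else if sev = "MEDIA" then "#fff6cc"
        else if sev = "BAJA" then "#f2ffcc"
        else ""
      if color ≠ "" then List.replicate row.length ("background-color: " ++ color) else sty
    else sty
  -- if "ml_flag" in row and int(row["ml_flag"]) == 1  (int() raising is excluded by Pre_)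
  let sty :=
    if d.contains "ml_flag" ∧ (PySem.Int.ofStr? ((d.get? "ml_flag").getD "")).getD 0 = 1 then
      sty.map (fun s => if s ≠ "" then s ++ "; font-weight: 600" else "font-weight: 600")
    else sty
  -- if "blocked" in row and int(row["blocked"]) == 1
  let sty :=
    if d.contains "blocked" ∧ (PySem.Int.ofStr? ((d.get? "blocked").getD "")).getD 0 = 1 then
      sty.map (fun s => if s ≠ "" then s ++ "; border-left: 4px solid #b00" else "border-left: 4px solid #b00")
    else sty
  sty

-- ===== PORT B =====
def row_style_py_alt (row : List (String × String)) : List String :=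
  let d := PySem.Dict.mk row
  let colors := PySem.Dict.mk [("CRITICA", "#ffcccc"), ("ALTA", "#ffe6cc"), ("MEDIA", "#fff6cc"), ("BAJA", "#f2ffcc")]
  let frags : List String := []
  let color := colors.getD ((d.get? "severity").getD "") ""
  let frags := if color ≠ "" then frags ++ ["background-color: " ++ color] else frags
  let frags :=
    if d.contains "ml_flag" ∧ (PySem.Int.ofStr? ((d.get? "ml_flag").getD "")).getD 0 = 1 then
      frags ++ ["font-weight: 600"]
    else frags
  let frags :=
    if d.contains "blocked" ∧ (PySem.Int.ofStr? ((d.get? "blocked").getD "")).getD 0 = 1 then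
      frags ++ ["border-left: 4px solid #b00"]
    else frags
  List.replicate row.length (PySem.Str.join "; " frags)

-- ===== PRECONDITION & SPEC =====
-- Pre_ excludes rows whose key list has duplicate keys (they do not represent a Python dict, whose
-- construction would collapse them), and rows where a present "ml_flag"/"blocked" value is not an
-- int-literal string, on which A raises ValueError.
def Pre_row_style_py (row : List (String × String)) : Prop :=
  (row.map Prod.fst).Nodup ∧
  (((PySem.Dict.mk row).get? "ml_flag").all (fun v => (PySem.Int.ofStr? v).isSome)) = true ∧
  (((PySem.Dict.mk row).get? "blocked").all (fun v => (PySem.Int.ofStr? v).isSome)) = true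
instance (row : List (String × String)) : Decidable (Pre_row_style_py row) := by unfold Pre_row_style_py; infer_instance

def pvWitness_row_style_py : (List (String × String)) := [("severity", "ALTA"), ("ml_flag", "1"), ("blocked", "0")]

def Spec_row_style_py (row : List (String × String)) (out : List String) : Prop := out = row_style_py_alt row
instance (row : List (String × String)) (out : List String) : Decidable (Spec_row_style_py row out) := by unfold Spec_row_style_py; infer_instance

-- ===== CLAIM (what is proved, stated in full; the proofs are below) =====
def Claim_equal_row_style_py : Prop := ∀ (row : List (String × String)), Dom_row_style_py row → Pre_row_style_py row → Spec_row_style_py row (row_style_py row)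

-- ===== LEMMAS AND PROOFS =====

-- ===== VERDICT (by name: the statement is the Claim_ definition above) =====
-- colors dict lookup misses for a non-color key
theorem pv_colors_getD_miss (v : String) (h1 : v ≠ "CRITICA") (h2 : v ≠ "ALTA") (h3 : v ≠ "MEDIA") (h4 : v ≠ "BAJA") :
    (PySem.Dict.mk [("CRITICA", "#ffcccc"), ("ALTA", "#ffe6cc"), ("MEDIA", "#fff6cc"), ("BAJA", "#f2ffcc")] : PySem.Dict String String).getD v "" = "" := by
  simp [PySem.Dict.getD_eq_get?_getD, PySem.Dict.get?,
    Ne.symm h1, Ne.symm h2, Ne.symm h3, Ne.symm h4]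

theorem pv_colors_getD_hit1 :
    (PySem.Dict.mk [("CRITICA", "#ffcccc"), ("ALTA", "#ffe6cc"), ("MEDIA", "#fff6cc"), ("BAJA", "#f2ffcc")] : PySem.Dict String String).getD "CRITICA" "" = "#ffcccc" := by decide
theorem pv_colors_getD_hit2 :
    (PySem.Dict.mk [("CRITICA", "#ffcccc"), ("ALTA", "#ffe6cc"), ("MEDIA", "#fff6cc"), ("BAJA", "#f2ffcc")] : PySem.Dict String String).getD "ALTA" "" = "#ffe6cc" := by decide
theorem pv_colors_getD_hit3 :
    (PySem.Dict.mk [("CRITICA", "#ffcccc"), ("ALTA", "#ffe6cc"), ("MEDIA", "#fff6cc"), ("BAJA", "#f2ffcc")] : PySem.Dict String String).getD "MEDIA" "" = "#fff6cc" := by decide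
theorem pv_colors_getD_hit4 :
    (PySem.Dict.mk [("CRITICA", "#ffcccc"), ("ALTA", "#ffe6cc"), ("MEDIA", "#fff6cc"), ("BAJA", "#f2ffcc")] : PySem.Dict String String).getD "BAJA" "" = "#f2ffcc" := by decide
theorem pv_colors_getD_empty :
    (PySem.Dict.mk [("CRITICA", "#ffcccc"), ("ALTA", "#ffe6cc"), ("MEDIA", "#fff6cc"), ("BAJA", "#f2ffcc")] : PySem.Dict String String).getD "" "" = "" := by decide

theorem row_style_py_spec : Claim_equal_row_style_py := by
  intro row _dom _pre
  unfold Spec_row_style_py row_style_py row_style_py_alt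
  have hc : (PySem.Dict.mk row).contains "severity" = ((PySem.Dict.mk row).get? "severity").isSome := by
    rw [PySem.Dict.contains_eq_isSome_get?]
  cases hg : (PySem.Dict.mk row).get? "severity" with
  | none =>
      simp [hc, hg, pv_colors_getD_empty, List.map_replicate]
      all_goals ((try split_ifs) <;> (try simp [List.map_replicate]) <;>
        first | rfl | exact Or.inr (by decide))
  | some v =>
      by_cases h1 : v = "CRITICA"
      · simp [hc, hg, h1, pv_colors_getD_hit1, List.map_replicate]
        all_goals ((try split_ifs) <;> (try simp [List.map_replicate]) <;>
          first | rfl | exact Or.inr (by decide))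
      by_cases h2 : v = "ALTA"
      · simp [hc, hg, h2, pv_colors_getD_hit2, List.map_replicate]
        all_goals ((try split_ifs) <;> (try simp [List.map_replicate]) <;>
          first | rfl | exact Or.inr (by decide))
      by_cases h3 : v = "MEDIA"
      · simp [hc, hg, h3, pv_colors_getD_hit3, List.map_replicate]
        all_goals ((try split_ifs) <;> (try simp [List.map_replicate]) <;>
          first | rfl | exact Or.inr (by decide))
      by_cases h4 : v = "BAJA"
      · simp [hc, hg, h4, pv_colors_getD_hit4, List.map_replicate]
        all_goals ((try split_ifs) <;> (try simp [List.map_replicate]) <;>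
          first | rfl | exact Or.inr (by decide))
      simp [hc, hg, h1, h2, h3, h4, pv_colors_getD_miss v h1 h2 h3 h4, List.map_replicate]
      all_goals ((try split_ifs) <;> (try simp [List.map_replicate]) <;>
        first | rfl | exact Or.inr (by decide))
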